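-- pv_equiv track=rewrite | github.com/chaptercool/w68141_Jezyki_i_paradygmaty_programowania_5IID-TIM_2022_GPL02 | lab1/3p.py | minimizator
-- ===== SOURCE A (Python) =====
-- def minimizator(zadania):
--     zadania.sort(key = lambda x: x[1])
--     suma_czas = 0
--     czas_w_toku = 0
--     optym_kolejka = []
--
--     for zadanie in zadania:
--         czas_w_toku += zadanie[1]
--         suma_czas += czas_w_toku
--         optym_kolejka.append(zadanie)
--
--     return optym_kolejka, suma_czas
-- ===== SOURCE B (Python) =====
-- def minimizator(zadania):
--     zadania.sort(key=lambda x: x[1])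
--     n = len(zadania)
--     suma_czas = sum((n - i) * z[1] for i, z in enumerate(zadania))
--     return list(zadania), suma_czas
-- ===== Notes on version B (the rewrite author's own statement) =====
-- stated objective: alternative
-- what changed: Replaces the running prefix-sum accumulator loop with a closed-form index-weighted sum over the sorted list: the task at sorted position i contributes (n - i) times its duration.
import Mathlib
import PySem

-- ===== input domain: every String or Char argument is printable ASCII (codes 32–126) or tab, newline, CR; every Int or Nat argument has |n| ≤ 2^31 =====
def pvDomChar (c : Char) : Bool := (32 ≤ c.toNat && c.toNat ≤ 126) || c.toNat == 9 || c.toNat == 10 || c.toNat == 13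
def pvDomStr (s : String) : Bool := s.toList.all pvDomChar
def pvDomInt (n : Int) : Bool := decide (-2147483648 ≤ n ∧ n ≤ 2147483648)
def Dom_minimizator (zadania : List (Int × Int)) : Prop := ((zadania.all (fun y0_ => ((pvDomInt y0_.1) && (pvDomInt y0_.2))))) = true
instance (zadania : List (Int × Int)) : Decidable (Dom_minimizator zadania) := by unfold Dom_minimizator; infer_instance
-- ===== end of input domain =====

-- B replaces the running prefix-sum accumulator loop with a closed-form
-- index-weighted sum over the sorted list (alternative decomposition, same cost).
-- Both A and B sort their argument in place in Python; the equivalence proved here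
-- is about the return value.


-- ===== PORT A =====
-- state = (suma_czas, czas_w_toku, optym_kolejka)
def minimizator (zadania : List (Int × Int)) : (List (Int × Int)) × Int :=
  let z := PySem.List.sorted zadania (fun x => x.2)
  let r := z.foldl
    (fun (st : Int × Int × List (Int × Int)) zadanie =>
      let czas := st.2.1 + zadanie.2
      (st.1 + czas, czas, st.2.2 ++ [zadanie]))
    (0, 0, [])
  (r.2.2, r.1)

-- ===== PORT B =====
def minimizator_alt (zadania : List (Int × Int)) : (List (Int × Int)) × Int :=
  let z := PySem.List.sorted zadania (fun x => x.2)
  let n : Int := z.length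
  let suma := (PySem.List.enumerate z).foldl (fun acc p => acc + (n - p.1) * p.2.2) 0
  (z, suma)

-- ===== PRECONDITION & SPEC =====
def Spec_minimizator (zadania : List (Int × Int)) (out : (List (Int × Int)) × Int) : Prop := out = minimizator_alt zadania
instance (zadania : List (Int × Int)) (out : (List (Int × Int)) × Int) : Decidable (Spec_minimizator zadania out) := by unfold Spec_minimizator; infer_instance

-- ===== CLAIM (what is proved, stated in full; the proofs are below) =====
def Claim_equal_minimizator : Prop := ∀ (zadania : List (Int × Int)), Dom_minimizator zadania → Spec_minimizator zadania (minimizator zadania)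

-- ===== LEMMAS AND PROOFS =====

/-- weighted sum: element at position i (from the front) weighted by (length - i) -/
def pvWsum : List (Int × Int) → Int
  | [] => 0
  | x :: xs => ((xs.length : Int) + 1) * x.2 + pvWsum xs

theorem pvLoopA (l : List (Int × Int)) : ∀ (suma czas : Int) (acc : List (Int × Int)),
    l.foldl (fun (st : Int × Int × List (Int × Int)) zadanie =>
        let c := st.2.1 + zadanie.2
        (st.1 + c, c, st.2.2 ++ [zadanie])) (suma, czas, acc)
      = (suma + czas * l.length + pvWsum l,
         czas + (l.map (·.2)).sum, acc ++ l) := by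
  induction l with
  | nil => intro suma czas acc; simp [pvWsum]
  | cons x xs ih =>
      intro suma czas acc
      simp only [List.foldl_cons, ih, pvWsum, List.map_cons, List.sum_cons, List.length_cons, Prod.mk.injEq]
      refine ⟨by push_cast; ring, by ring, by simp⟩

theorem pvLoopB (n : Int) (l : List (Int × Int)) : ∀ (s acc : Int), n - s = l.length →
    (PySem.List.enumerate l s).foldl (fun acc p => acc + (n - p.1) * p.2.2) acc
      = acc + pvWsum l := by
  induction l with
  | nil => intro s acc _; simp [PySem.List.enumerate_nil, pvWsum]
  | cons x xs ih =>
      intro s acc h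
      simp only [List.length_cons] at h
      rw [PySem.List.enumerate_cons, List.foldl_cons, ih (s + 1) _ (by push_cast at h ⊢; omega)]
      simp only [pvWsum]
      have : n - s = (xs.length : Int) + 1 := by push_cast at h ⊢; omega
      rw [this]; ring

-- ===== VERDICT (by name: the statement is the Claim_ definition above) =====
theorem minimizator_spec : Claim_equal_minimizator := by
  intro zadania _
  unfold Spec_minimizator minimizator minimizator_alt
  simp only [pvLoopA, pvLoopB ((PySem.List.sorted zadania (fun x => x.2)).length : Int)
    (PySem.List.sorted zadania (fun x => x.2)) 0 0 (by simp)]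
  simp
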